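-- pv_equiv track=rewrite | github.com/edupinhata/PythonInQonsultorasServer | Core.py | getMinExp
-- ===== SOURCE A (Python) =====
-- def getMinExp(lista,listaex):
--   if len(lista)>0:
--     minimo=lista[0]
--   else:
--     return -1
--
--   for i in range(len(lista)):
--     if(lista[i] not in listaex):
--       minimo=lista[i]
--       break
--
--   if minimo in listaex:
--     return -1
--
--   for i in range(len(lista)):
--     if lista[i]<minimo and lista[i] not in listaex:
--       minimo=lista[i]
--   return minimo
-- ===== SOURCE B (Python) =====
-- def getMinExp(lista, listaex):
--     ex = set(listaex)
--     for x in sorted(lista):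
--         if x not in ex:
--             return x
--     return -1
-- ===== Notes on version B (the rewrite author's own statement) =====
-- stated objective: simpler
-- what changed: Replaces A's three passes (break-scan for a first survivor, membership re-check, running-minimum scan) by one sort followed by a single ordered scan that returns the first element not in a prebuilt exclusion set.
import Mathlib
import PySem

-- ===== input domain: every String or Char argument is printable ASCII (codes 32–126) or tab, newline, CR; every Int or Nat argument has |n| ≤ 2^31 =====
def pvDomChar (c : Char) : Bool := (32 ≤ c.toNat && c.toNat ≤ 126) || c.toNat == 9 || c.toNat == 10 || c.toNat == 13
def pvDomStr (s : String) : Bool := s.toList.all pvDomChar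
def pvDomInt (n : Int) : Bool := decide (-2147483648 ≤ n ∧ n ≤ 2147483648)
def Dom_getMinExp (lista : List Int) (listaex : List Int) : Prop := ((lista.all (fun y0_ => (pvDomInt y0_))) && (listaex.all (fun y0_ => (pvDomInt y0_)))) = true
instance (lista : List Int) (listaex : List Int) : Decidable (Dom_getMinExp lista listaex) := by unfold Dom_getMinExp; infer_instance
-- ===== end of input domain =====

-- B replaces A's three passes (break-scan, membership re-check, running-minimum scan)
-- with one sort followed by a single ordered scan returning the first non-excluded element.

-- ===== PORT A =====
-- first loop: 'for i in range(len(lista)): if lista[i] not in listaex: minimo = lista[i]; break'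
def getMinExpFirst (listaex : List Int) (minimo : Int) : List Int → Int
  | [] => minimo
  | x :: xs => if !(listaex.contains x) then x else getMinExpFirst listaex minimo xs

def getMinExp (lista : List Int) (listaex : List Int) : Int :=
  match lista with
  | [] => -1
  | m0 :: _ =>
    let minimo := getMinExpFirst listaex m0 lista
    if listaex.contains minimo then -1
    else lista.foldl (fun m x => if x < m && !(listaex.contains x) then x else m) minimo

-- ===== PORT B =====
-- 'for x in sorted(lista): if x not in ex: return x' then 'return -1'
def getMinExpAltScan (ex : PySem.Set Int) : List Int → Int
  | [] => -1
  | x :: xs => if !(PySem.Set.contains ex x) then x else getMinExpAltScan ex xs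

def getMinExp_alt (lista : List Int) (listaex : List Int) : Int :=
  let ex : PySem.Set Int := PySem.Set.ofList listaex
  getMinExpAltScan ex (PySem.List.sorted lista (fun x => x) false)

-- ===== PRECONDITION & SPEC =====
def Spec_getMinExp (lista : List Int) (listaex : List Int) (out : Int) : Prop := out = getMinExp_alt lista listaex
instance (lista : List Int) (listaex : List Int) (out : Int) : Decidable (Spec_getMinExp lista listaex out) := by unfold Spec_getMinExp; infer_instance

-- ===== CLAIM (what is proved, stated in full; the proofs are below) =====
def Claim_equal_getMinExp : Prop := ∀ (lista : List Int) (listaex : List Int), Dom_getMinExp lista listaex → Spec_getMinExp lista listaex (getMinExp lista listaex)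

-- ===== LEMMAS AND PROOFS =====

-- A's first loop returns the first non-excluded element, else the initial value.
theorem getMinExpFirst_eq (listaex : List Int) (m0 : Int) (l : List Int) :
    getMinExpFirst listaex m0 l =
      match l.filter (fun x => !(listaex.contains x)) with
      | [] => m0
      | x :: _ => x := by
  induction l with
  | nil => rfl
  | cons y ys ih =>
    simp only [getMinExpFirst, List.filter_cons]
    by_cases h : listaex.contains y
    · simp only [h, Bool.not_true, Bool.false_eq_true, if_false, ih]
    · rw [Bool.not_eq_true] at h
      simp only [h, Bool.not_false, if_true]

-- B's scan returns the first non-excluded element, else -1.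
theorem getMinExpAltScan_eq (ex : PySem.Set Int) (l : List Int) :
    getMinExpAltScan ex l =
      match l.filter (fun x => !(PySem.Set.contains ex x)) with
      | [] => -1
      | x :: _ => x := by
  induction l with
  | nil => rfl
  | cons y ys ih =>
    simp only [getMinExpAltScan, List.filter_cons]
    by_cases h : PySem.Set.contains ex y
    · simp only [h, Bool.not_true, Bool.false_eq_true, if_false, ih]
    · rw [Bool.not_eq_true] at h
      simp only [h, Bool.not_false, if_true]

-- membership in set(listaex) is membership in listaex
theorem contains_ofList (listaex : List Int) (x : Int) :
    PySem.Set.contains (PySem.Set.ofList listaex) x = listaex.contains x := by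
  simp [PySem.Set.contains, PySem.Set.mem_ofList]

-- A's second loop, restricted to the surviving (non-excluded) elements
theorem foldl_min_filter (listaex : List Int) (l : List Int) (m : Int) :
    l.foldl (fun m x => if x < m && !(listaex.contains x) then x else m) m =
      (l.filter (fun x => !(listaex.contains x))).foldl (fun m x => if x < m then x else m) m := by
  induction l generalizing m with
  | nil => rfl
  | cons y ys ih =>
    simp only [List.foldl_cons, List.filter_cons]
    by_cases h : listaex.contains y
    · simp only [h, Bool.not_true, Bool.and_false, Bool.false_eq_true, if_false, ih]
    · rw [Bool.not_eq_true] at h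
      simp only [h, Bool.not_false, Bool.and_true, ih]
      by_cases hm : y < m
      · simp [hm]
      · simp [hm]

-- the running-minimum fold: its result is in the initial value or the list, and is a lower bound
theorem foldl_min_props (l : List Int) (m : Int) :
    (l.foldl (fun m x => if x < m then x else m) m = m ∨
       l.foldl (fun m x => if x < m then x else m) m ∈ l) ∧
    l.foldl (fun m x => if x < m then x else m) m ≤ m ∧
    ∀ y ∈ l, l.foldl (fun m x => if x < m then x else m) m ≤ y := by
  induction l generalizing m with
  | nil => simp
  | cons z zs ih =>
    simp only [List.foldl_cons]
    by_cases h : z < m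
    · simp only [if_pos h]
      obtain ⟨h1, h2, h3⟩ := ih z
      refine ⟨?_, by omega, ?_⟩
      · rcases h1 with h1 | h1 <;> simp [h1]
      · intro y hy
        rcases List.mem_cons.mp hy with rfl | hy
        · exact h2
        · exact h3 y hy
    · simp only [if_neg h]
      obtain ⟨h1, h2, h3⟩ := ih m
      refine ⟨?_, h2, ?_⟩
      · rcases h1 with h1 | h1 <;> simp [h1]
      · intro y hy
        rcases List.mem_cons.mp hy with rfl | hy
        · omega
        · exact h3 y hy

theorem getMinExp_spec_core (lista listaex : List Int) :
    getMinExp lista listaex = getMinExp_alt lista listaex := by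
  have hfB : (PySem.List.sorted lista (fun x => x) false).filter
        (fun x => !(PySem.Set.contains (PySem.Set.ofList listaex) x)) =
      (PySem.List.sorted lista (fun x => x) false).filter (fun x => !(listaex.contains x)) := by
    apply List.filter_congr
    intro x _
    rw [contains_ofList]
  have hBeq : getMinExp_alt lista listaex =
      match (PySem.List.sorted lista (fun x => x) false).filter (fun x => !(listaex.contains x)) with
      | [] => -1
      | x :: _ => x := by
    unfold getMinExp_alt
    rw [getMinExpAltScan_eq, hfB]
  have hperm : ((PySem.List.sorted lista (fun x => x) false).filter
        (fun x => !(listaex.contains x))).Perm (lista.filter (fun x => !(listaex.contains x))) :=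
    (PySem.List.sorted_perm lista (fun x => x) false).filter _
  rw [hBeq]
  cases hl : lista with
  | nil =>
    have hsnil : PySem.List.sorted lista (fun x => x) false = [] := by
      rw [PySem.List.sorted_eq_nil_iff, hl]
    rw [← hl, hsnil]
    simp [getMinExp, hl]
  | cons m0 rest =>
    rw [← hl]
    cases hS : lista.filter (fun x => !(listaex.contains x)) with
    | nil =>
      -- every element of lista is excluded: A returns -1 via the membership re-check
      rw [hS] at hperm
      have htnil : (PySem.List.sorted lista (fun x => x) false).filter
          (fun x => !(listaex.contains x)) = [] := hperm.eq_nil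
      rw [htnil]
      have hall := List.filter_eq_nil_iff.mp hS
      have hm0 : listaex.contains m0 = true := by
        have := hall m0 (by rw [hl]; exact List.mem_cons_self)
        simpa using this
      rw [hl] at hS ⊢
      simp only [getMinExp, getMinExpFirst_eq, hS, hm0, if_true]
    | cons s0 S' =>
      -- A's first loop lands on s0, the first survivor
      have hs0mem : s0 ∈ lista.filter (fun x => !(listaex.contains x)) := by
        rw [hS]; exact List.mem_cons_self
      have hs0 : listaex.contains s0 = false := by
        have := List.of_mem_filter hs0mem
        simpa using this
      rw [hS] at hperm
      cases ht : (PySem.List.sorted lista (fun x => x) false).filter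
          (fun x => !(listaex.contains x)) with
      | nil =>
        rw [ht] at hperm
        exact absurd hperm.symm.eq_nil (by simp)
      | cons mB tB =>
        rw [ht] at hperm
        have hmBmem : mB ∈ lista.filter (fun x => !(listaex.contains x)) := by
          rw [hS]; exact hperm.mem_iff.mp List.mem_cons_self
        have hpw : ((PySem.List.sorted lista (fun x => x) false).filter
            (fun x => !(listaex.contains x))).Pairwise (fun a b => a ≤ b) :=
          List.Pairwise.filter _ (PySem.List.sorted_pairwise lista (fun x => x))
        rw [ht] at hpw
        have hmB_le : ∀ y ∈ lista.filter (fun x => !(listaex.contains x)), mB ≤ y := by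
          intro y hy
          rcases List.mem_cons.mp (hperm.mem_iff.mpr (hS ▸ hy)) with h | h
          · exact le_of_eq h.symm
          · exact (List.pairwise_cons.mp hpw).1 y h
        -- evaluate A: first loop gives s0, the re-check passes, second loop is the min fold
        have hA : getMinExp lista listaex =
            lista.foldl (fun m x => if x < m && !(listaex.contains x) then x else m) s0 := by
          rw [hl]
          simp only [getMinExp, getMinExpFirst_eq]
          rw [← hl, hS]
          simp only [hs0, Bool.false_eq_true, if_false]
        rw [hA, foldl_min_filter, hS]
        obtain ⟨h1, h2, h3⟩ := foldl_min_props S' s0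
        set r := S'.foldl (fun m x => if x < m then x else m) s0 with hr
        have hrmem : r ∈ (s0 :: S') := by
          rcases h1 with h1 | h1
          · rw [h1]; exact List.mem_cons_self
          · exact List.mem_cons_of_mem _ h1
        have hle1 : mB ≤ r := hmB_le r (by rw [hS]; exact hrmem)
        have hle2 : r ≤ mB := by
          rcases List.mem_cons.mp (hperm.mem_iff.mp List.mem_cons_self) with h | h
          · omega
          · exact h3 mB h
        simp only [List.foldl_cons, ite_self, ← hr]
        omega

-- ===== VERDICT (by name: the statement is the Claim_ definition above) =====
theorem getMinExp_spec : Claim_equal_getMinExp := by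
  intro lista listaex _
  unfold Spec_getMinExp
  exact getMinExp_spec_core lista listaex
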